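-- pv_equiv track=rewrite | github.com/SoominHeo/src | Herald/lcslib.py | word_lcs
-- ===== SOURCE A (Python) =====
-- def common_set_table(list1,list2):
-- 	table = []
--
-- 	for element_1 in range(len(list1)):
-- 		tmp = []
-- 		for element_2 in range(len(list2)):
-- 			#append len(intersection)
-- 			tmp.append(len(list(set(list1[element_1]) & set(list2[element_2]))))
-- 		table.append(tmp)
-- 	# for idx,line in enumerate(list1):
-- 	# for idx,line in enumerate(list2):
-- 	return table
--
-- def make_candidate(table,x,y):
-- 	candidate = []
-- 	for tmp_x in range(x):
-- 		candidate += table[tmp_x][:y]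
--
-- 	return candidate
--
-- def get_max_pair(table,x,y):
-- 	candidate = make_candidate(table,x,y)
-- 	candidate = candidate[:-1]
-- 	index = candidate.index(max(candidate))
-- 	new_x, new_y = divmod(index,y)
-- 	if new_x == x-1 and new_y==y:
-- 		return new_x,new_y
-- 	elif new_x == x and new_y == y:
-- 		return new_x,new_Y
-- 	elif new_x == x-1 or new_y ==y-1:
-- 		candidate = make_candidate(table,x-1,y-1)
-- 		index = candidate.index(max(candidate))
-- 		new_x, new_y = divmod(index,y)
--
-- 	return new_x,new_y
--
-- def word_lcs(kor, eng):
-- 	#start idx = 1,1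
-- 	#kor.reverse()
-- 	#eng.reverse()
-- 	if len(kor) == 0 or len(eng) == 0:
-- 		return None
-- 	lengths = [[0 for y in range(len(eng)+1)] for x in range(len(kor)+1)]
--
-- 	table = common_set_table(kor, eng)
-- 	result = []
-- 	length_kor = len(table)
-- 	length_eng = len(table[0])
--
--
--
-- 	result.append((1,1))
-- 	result.append((length_kor,length_eng))
--
-- 	#make LCS table
-- 	for  x in range(length_kor):
-- 		for y in range(length_eng):
-- 			if x == 0 or y == 0:
-- 				lengths[x+1][y+1] += table[x][y]
-- 			else:
-- 				candidate = []
-- 				for tmp_x in range(x):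
-- 					candidate += lengths[tmp_x +1][:y +1]
-- 				lengths[x+1][y+1] += max(candidate) + table[x][y]
-- 	#for x in range(length_kor):
-- 	#	for y in range(length_eng):
-- 	#		if x == 0 or y == 0:
-- 	#			lengths[x][y] += table[x][y]
-- 	#		else:
-- 	#			candidate = []
-- 	#			for tmp_x in range(x):
-- 	#				candidate+=lengths[tmp_x][:y]
-- 	#			lengths[x][y] += max(candidate) + table[x][y]
--
-- 	#trace
-- 	#for make first candidate = whole lengths table
-- 	while(True):
-- 		length_kor += 1
-- 		length_eng += 1
-- 		(length_kor,length_eng) = get_max_pair(lengths,length_kor,length_eng)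
-- 		if(length_kor <= 1 or length_eng <=1):
-- 			break;
-- 		#result.append((len(kor)-length_kor+1,len(eng)-length_eng+1))
-- 		result.append((length_kor,length_eng))
-- 	result.sort()
--
-- 	return list(set(result))
-- ===== SOURCE B (Python) =====
-- # B: character sets are built once, and the DP cell maximum over lengths[1..x][0..y]
-- # comes from a running prefix-maximum row instead of re-scanning all earlier rows
-- # (O(n^2) DP instead of O(n^4)).
--
-- def _argmax_pair(cand, width):
--     return divmod(cand.index(max(cand)), width)
--
-- def _max_pair(lengths, x, y):
--     cand = [v for row in lengths[:x] for v in row[:y]]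
--     i, j = _argmax_pair(cand[:-1], y)
--     if i == x - 1 or j == y - 1:
--         cand = [v for row in lengths[:x - 1] for v in row[:y - 1]]
--         i, j = _argmax_pair(cand, y)
--     return i, j
--
-- def word_lcs(kor, eng):
--     if len(kor) == 0 or len(eng) == 0:
--         return None
--     K, E = len(kor), len(eng)
--     esets = [set(w) for w in eng]
--     table = [[len(set(w) & es) for es in esets] for w in kor]
--     lengths = [[0] * (E + 1)]
--     M = [0] * (E + 1)  # M[y] = max of lengths[1..x][0..y] built so far
--     for x, trow in enumerate(table):
--         row = [0]
--         for y, (t, m) in enumerate(zip(trow, M)):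
--             row.append(t if x == 0 or y == 0 else m + t)
--         lengths.append(row)
--         run = 0
--         newM = []
--         for m, v in zip(M, row):
--             run = max(run, v)
--             newM.append(max(m, run))
--         M = newM
--     result = [(1, 1), (K, E)]
--     X, Y = K, E
--     while True:
--         X, Y = _max_pair(lengths, X + 1, Y + 1)
--         if X <= 1 or Y <= 1:
--             break
--         result.append((X, Y))
--     result.sort()
--     return list(set(result))
-- ===== Notes on version B (the rewrite author's own statement) =====
-- stated objective: faster
-- what changed: B builds each word's character set once, computes every DP cell's rectangle maximum from a running prefix-maximum row instead of re-scanning all earlier DP rows per cell, and the traceback flattens the candidate rectangle with one comprehension.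
import Mathlib
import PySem

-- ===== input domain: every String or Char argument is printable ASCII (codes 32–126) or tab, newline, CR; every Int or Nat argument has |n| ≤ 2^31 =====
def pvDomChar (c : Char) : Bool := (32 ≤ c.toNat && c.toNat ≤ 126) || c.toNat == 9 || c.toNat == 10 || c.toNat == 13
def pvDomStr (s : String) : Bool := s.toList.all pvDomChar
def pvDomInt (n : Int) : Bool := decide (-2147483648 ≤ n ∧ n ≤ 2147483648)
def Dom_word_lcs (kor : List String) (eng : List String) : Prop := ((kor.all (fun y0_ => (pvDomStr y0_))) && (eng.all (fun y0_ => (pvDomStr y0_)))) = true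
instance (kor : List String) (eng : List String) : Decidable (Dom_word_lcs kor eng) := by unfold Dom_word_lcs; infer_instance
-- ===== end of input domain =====

-- B builds the character sets once, computes each DP cell's rectangle maximum from a running
-- prefix-maximum row instead of re-scanning all earlier DP rows per cell, and the traceback
-- flattens the candidate rectangle with a comprehension; same return value (proved below).
-- Both Pythons end with 'result.sort(); return list(set(result))'; that final step is ported
-- by hand below (pvListSet): an exact model of CPython's set table (int/tuple hashing, open
-- addressing with linear probes and perturbation, growth, iteration in slot order) for the
-- pairs of non-negative ints this function stores.

-- ===== PORT A =====
def common_set_table (list1 list2 : List String) : List (List Int) :=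
  (PySem.List.pyRange 0 (PySem.List.len list1) 1).foldl (fun table element_1 =>
    table ++ [(PySem.List.pyRange 0 (PySem.List.len list2) 1).foldl (fun tmp element_2 =>
      tmp ++ [PySem.Set.len (PySem.Set.inter
        (PySem.Set.ofList (PySem.List.pyGetD list1 element_1 "").toList)
        (PySem.Set.ofList (PySem.List.pyGetD list2 element_2 "").toList))]) []]) []

def make_candidate (table : List (List Int)) (x y : Int) : List Int :=
  (PySem.List.pyRange 0 x 1).foldl (fun candidate tmp_x =>
    candidate ++ PySem.List.slice (PySem.List.pyGetD table tmp_x []) none (some y)) []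

def get_max_pair (table : List (List Int)) (x y : Int) : Int × Int :=
  let candidate := make_candidate table x y
  let candidate := PySem.List.slice candidate none (some (-1))
  -- max()/list.index() raise on an empty list, divmod on y = 0; neither occurs at any call
  -- site reached from word_lcs (candidates are nonempty there, y ≥ 2): the defaults are unused
  let index : Int := ((PySem.List.index? candidate ((PySem.List.max? candidate (fun v => v)).getD 0)).getD 0 : Nat)
  let p := (PySem.Int.divmod? index y).getD (0, 0)
  if p.1 = x - 1 ∧ p.2 = y then (p.1, p.2)
  else if p.1 = x ∧ p.2 = y then (p.1, p.2)  -- Python: NameError (new_Y); unreachable, p.2 < y whenever 0 < y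
  else if p.1 = x - 1 ∨ p.2 = y - 1 then
    let candidate := make_candidate table (x - 1) (y - 1)
    let index : Int := ((PySem.List.index? candidate ((PySem.List.max? candidate (fun v => v)).getD 0)).getD 0 : Nat)
    (PySem.Int.divmod? index y).getD (0, 0)
  else (p.1, p.2)

-- hand-written port of CPython's list(set(xs)) on pairs of non-negative ints: exact slot-order
-- simulation of the CPython set (used by both ports for their identical final statement)
def pvIntHash (n : Int) : Nat := n.toNat % (2^61 - 1)

def pvHashStep (acc lane : Nat) : Nat :=
  let acc := (acc + lane * 14029467366897019727) % 2^64
  let acc := ((acc <<< 31) % 2^64) ||| (acc >>> 33)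
  (acc * 11400714785074694791) % 2^64

def pvTupHash2 (p : Int × Int) : Nat :=
  let acc := pvHashStep (pvHashStep 2870177450012600261 (pvIntHash p.1)) (pvIntHash p.2)
  let acc := (acc + ((2 ^^^ 2870177450012600261 ^^^ 3527539) % 2^64)) % 2^64
  if acc = 2^64 - 1 then 1546275796 else acc

abbrev PvTab := List (Option ((Int × Int) × Nat))

def pvFindFree (table : PvTab) : List Nat → Option Nat
  | [] => none
  | j :: js => if table.getD j none = none then some j else pvFindFree table js

def pvScan (table : PvTab) (key : Int × Int) (h : Nat) : List Nat → Option (Sum Nat Unit)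
  | [] => none
  | j :: js =>
    match table.getD j none with
    | none => some (Sum.inl j)
    | some e => if e.2 = h ∧ e.1 = key then some (Sum.inr ()) else pvScan table key h js

def pvAddLoop (key : Int × Int) (h : Nat) (mask : Nat) :
    Nat → Nat → Nat → PvTab → PvTab × Bool
  | 0, _, _, table => (table, false)
  | fuel+1, perturb, i, table =>
    match table.getD i none with
    | none => (table.set i (some (key, h)), true)
    | some e =>
      if e.2 = h ∧ e.1 = key then (table, false)
      else
        let js := if i + 9 ≤ mask then (List.range 9).map (fun k => i+1+k) else []
        match pvScan table key h js with
        | some (Sum.inl j) => (table.set j (some (key, h)), true)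
        | some (Sum.inr _) => (table, false)
        | none => pvAddLoop key h mask fuel (perturb >>> 5) ((i*5+1+(perturb >>> 5)) % (mask+1)) table

def pvCleanLoop (key : Int × Int) (h : Nat) (mask : Nat) :
    Nat → Nat → Nat → PvTab → PvTab
  | 0, _, _, table => table
  | fuel+1, perturb, i, table =>
    if table.getD i none = none then table.set i (some (key, h))
    else
      let js := if i + 9 ≤ mask then (List.range 9).map (fun k => i+1+k) else []
      match pvFindFree table js with
      | some j => table.set j (some (key, h))
      | none => pvCleanLoop key h mask fuel (perturb >>> 5) ((i*5+1+(perturb >>> 5)) % (mask+1)) table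

def pvSetAdd (st : PvTab × Nat × Nat) (key : Int × Int) : PvTab × Nat × Nat :=
  let h := pvTupHash2 key
  let r := pvAddLoop key h st.2.1 (st.2.1 + 65) h (h % (st.2.1+1)) st.1
  if r.2 then
    let fill := st.2.2 + 1
    if fill * 5 ≥ st.2.1 * 3 then
      let minused := if 50000 < fill then fill * 2 else fill * 4
      let newsize := (List.range 64).foldl (fun s _ => if s ≤ minused then s * 2 else s) 8
      let table := r.1.foldl (fun tab e =>
        match e with
        | none => tab
        | some kh => pvCleanLoop kh.1 kh.2 (newsize-1) (newsize + 65) kh.2 (kh.2 % newsize) tab)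
        (List.replicate newsize none)
      (table, newsize - 1, fill)
    else (r.1, st.2.1, fill)
  else st

def pvListSet (xs : List (Int × Int)) : List (Int × Int) :=
  ((xs.foldl pvSetAdd (List.replicate 8 none, 7, 0)).1).foldr
    (fun e acc => match e with | none => acc | some kh => kh.1 :: acc) []

def word_lcs_trace (lengths : List (List Int)) : Nat → Int → Int → List (Int × Int) → List (Int × Int)
  | 0, _, _, result => result  -- fuel: the row coordinate strictly decreases, fuel = len kor + 2 is never exhausted
  | fuel + 1, length_kor, length_eng, result =>
    let p := get_max_pair lengths (length_kor + 1) (length_eng + 1)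
    if p.1 ≤ 1 ∨ p.2 ≤ 1 then result
    else word_lcs_trace lengths fuel p.1 p.2 (result ++ [p])

def word_lcs (kor : List String) (eng : List String) : Option (List (Int × Int)) :=
  if PySem.List.len kor = 0 ∨ PySem.List.len eng = 0 then none
  else
    let lengths : List (List Int) :=
      (PySem.List.pyRange 0 (PySem.List.len kor + 1) 1).map (fun _ =>
        (PySem.List.pyRange 0 (PySem.List.len eng + 1) 1).map (fun _ => (0 : Int)))
    let table := common_set_table kor eng
    let length_kor := PySem.List.len table
    let length_eng := PySem.List.len (PySem.List.pyGetD table 0 [])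
    let result : List (Int × Int) := [(1, 1), (length_kor, length_eng)]
    let lengths := (PySem.List.pyRange 0 length_kor 1).foldl (fun L x =>
      (PySem.List.pyRange 0 length_eng 1).foldl (fun L y =>
        let v : Int :=
          if x = 0 ∨ y = 0 then
            PySem.List.pyGetD (PySem.List.pyGetD table x []) y 0
          else
            let candidate := (PySem.List.pyRange 0 x 1).foldl (fun candidate tmp_x =>
              candidate ++ PySem.List.slice (PySem.List.pyGetD L (tmp_x + 1) []) none (some (y + 1))) []
            ((PySem.List.max? candidate (fun v => v)).getD 0) +
              PySem.List.pyGetD (PySem.List.pyGetD table x []) y 0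
        PySem.List.pySetD L (x + 1)
          (PySem.List.pySetD (PySem.List.pyGetD L (x + 1) []) (y + 1)
            (PySem.List.pyGetD (PySem.List.pyGetD L (x + 1) []) (y + 1) 0 + v))) L) lengths
    let result := word_lcs_trace lengths (kor.length + 2) length_kor length_eng result
    some (pvListSet (PySem.List.sorted2 result Prod.fst Prod.snd))

-- ===== PORT B =====
-- B's row loop: row = [0]; for y, (t, m) in enumerate(zip(trow, M)): row.append(...)
def pvBuildRow (x : Int) (trow M : List Int) : List Int :=
  (PySem.List.enumerate (trow.zip M)).foldl (fun row ytm =>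
    row ++ [if x = 0 ∨ ytm.1 = 0 then ytm.2.1 else ytm.2.2 + ytm.2.1]) [(0 : Int)]

-- B's prefix-maximum update: run = 0; newM = []; for m, v in zip(M, row): ...
def pvUpdM (M row : List Int) : List Int :=
  ((M.zip row).foldl (fun (p : Int × List Int) mv =>
    (max p.1 mv.2, p.2 ++ [max mv.1 (max p.1 mv.2)])) ((0 : Int), ([] : List Int))).2

-- B's _argmax_pair: divmod(cand.index(max(cand)), width)
def pvArgmaxPair (cand : List Int) (width : Int) : Int × Int :=
  (PySem.Int.divmod?
    (((PySem.List.index? cand ((PySem.List.max? cand (fun v => v)).getD 0)).getD 0 : Nat) : Int)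
    width).getD (0, 0)

-- B's _max_pair: flatten the candidate rectangle by comprehension
def pvMaxPair (lengths : List (List Int)) (x y : Int) : Int × Int :=
  let cand := (PySem.List.slice lengths none (some x)).flatMap
    (fun row => PySem.List.slice row none (some y))
  let p := pvArgmaxPair (PySem.List.slice cand none (some (-1))) y
  if p.1 = x - 1 ∨ p.2 = y - 1 then
    let cand := (PySem.List.slice lengths none (some (x - 1))).flatMap
      (fun row => PySem.List.slice row none (some (y - 1)))
    pvArgmaxPair cand y
  else p

def word_lcs_alt_trace (lengths : List (List Int)) : Nat → Int → Int → List (Int × Int) → List (Int × Int)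
  | 0, _, _, res => res
  | fuel + 1, X, Y, res =>
    let p := pvMaxPair lengths (X + 1) (Y + 1)
    if p.1 ≤ 1 ∨ p.2 ≤ 1 then res
    else word_lcs_alt_trace lengths fuel p.1 p.2 (res ++ [p])

def word_lcs_alt (kor : List String) (eng : List String) : Option (List (Int × Int)) :=
  if PySem.List.len kor = 0 ∨ PySem.List.len eng = 0 then none
  else
    let K := PySem.List.len kor
    let E := PySem.List.len eng
    let esets := eng.map (fun w => PySem.Set.ofList w.toList)
    let table := kor.map (fun w =>
      esets.map (fun es => PySem.Set.len (PySem.Set.inter (PySem.Set.ofList w.toList) es)))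
    let initRow : List Int := PySem.List.pyRepeat [(0 : Int)] (E + 1)
    let dp := (PySem.List.enumerate table).foldl
      (fun (st : List (List Int) × List Int) xt =>
        let row := pvBuildRow xt.1 xt.2 st.2
        (st.1 ++ [row], pvUpdM st.2 row)) ([initRow], initRow)
    let res := word_lcs_alt_trace dp.1 (kor.length + 2) K E [(1, 1), (K, E)]
    some (pvListSet (PySem.List.sorted2 res Prod.fst Prod.snd))

-- ===== PRECONDITION & SPEC =====
def Spec_word_lcs (kor : List String) (eng : List String) (out : Option (List (Int × Int))) : Prop := out = word_lcs_alt kor eng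
instance (kor : List String) (eng : List String) (out : Option (List (Int × Int))) : Decidable (Spec_word_lcs kor eng out) := by unfold Spec_word_lcs; infer_instance

-- ===== CLAIM =====
def Claim_equal_word_lcs : Prop := ∀ (kor : List String) (eng : List String), Dom_word_lcs kor eng → Spec_word_lcs kor eng (word_lcs kor eng)

-- ===== LEMMAS AND PROOFS =====


lemma candFlat (L : List (List Int)) (y : Int) : ∀ (n : Nat) (acc : List Int),
    (PySem.List.pyRange 0 (n:Int) 1).foldl
      (fun c i => c ++ PySem.List.slice (PySem.List.pyGetD L i []) none (some y)) acc
    = acc ++ (L.take n).flatMap (fun r => PySem.List.slice r none (some y)) := by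
  intro n
  induction n with
  | zero => intro acc; simp [PySem.List.pyRange_one_eq_nil]
  | succ n ih =>
    intro acc
    have hcast : ((n+1 : Nat) : Int) = (n : Int) + 1 := by push_cast; ring
    rw [hcast, PySem.List.pyRange_one_succ_right (by positivity), List.foldl_append]
    rw [ih]
    simp only [List.foldl_cons, List.foldl_nil, PySem.List.pyGetD_natCast]
    by_cases h : n < L.length
    · have ht : L.take (n+1) = L.take n ++ [L[n]] := by
        rw [List.take_add_one]; simp [List.getElem?_eq_getElem h]
      rw [ht, List.flatMap_append]
      simp [List.getD_eq_getElem?_getD, List.getElem?_eq_getElem h]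
    · have h1 : L.take (n+1) = L.take n := by
        rw [List.take_of_length_le (by omega), List.take_of_length_le (by omega)]
      have h2 : L.getD n [] = [] := by
        rw [List.getD_eq_getElem?_getD, List.getElem?_eq_none (by omega)]; rfl
      have h3 : L[n]? = none := List.getElem?_eq_none (by omega)
      simp [h1, h3, PySem.List.slice]

lemma make_candidate_eq (L : List (List Int)) {x : Int} (y : Int) (hx : 0 ≤ x) :
    make_candidate L x y
    = (PySem.List.slice L none (some x)).flatMap (fun r => PySem.List.slice r none (some y)) := by
  obtain ⟨n, rfl⟩ : ∃ n : Nat, x = (n : Int) := ⟨x.toNat, (Int.toNat_of_nonneg hx).symm⟩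
  rw [PySem.List.slice_to _ (by positivity)]
  unfold make_candidate
  rw [candFlat]
  simp

lemma get_eq (L : List (List Int)) {x y : Int} (hx : 1 ≤ x) (hy : 0 < y) :
    get_max_pair L x y = pvMaxPair L x y := by
  simp only [get_max_pair, pvMaxPair, pvArgmaxPair]
  rw [make_candidate_eq L y (by omega), make_candidate_eq L (y-1) (by omega)]
  set cand := ((PySem.List.slice L none (some x)).flatMap
      (fun r => PySem.List.slice r none (some y))) with hcand
  set c2 := PySem.List.slice cand none (some (-1)) with hc2
  set idx : Int := (((PySem.List.index? c2 ((PySem.List.max? c2 (fun v => v)).getD 0)).getD 0 : Nat) : Int) with hidx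
  have hdm : PySem.Int.divmod? idx y = some (PySem.Int.floordiv idx y, PySem.Int.mod idx y) := by
    simp [PySem.Int.divmod?]
    exact ⟨by omega, rfl, rfl⟩
  rw [hdm]
  have hlt : PySem.Int.mod idx y < y := PySem.Int.mod_lt _ hy
  simp only [Option.getD_some]
  rw [if_neg (by simp; omega), if_neg (by simp; omega)]


lemma trace_eq (L : List (List Int)) : ∀ (fuel : Nat) (X Y : Int) (res : List (Int × Int)),
    1 ≤ X → 1 ≤ Y → word_lcs_trace L fuel X Y res = word_lcs_alt_trace L fuel X Y res := by
  intro fuel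
  induction fuel with
  | zero => intros; rfl
  | succ f ih =>
    intro X Y res hX hY
    simp only [word_lcs_trace, word_lcs_alt_trace]
    rw [← get_eq L (by omega) (by omega : (0:Int) < Y + 1)]
    set p := get_max_pair L (X + 1) (Y + 1)
    by_cases h : p.1 ≤ 1 ∨ p.2 ≤ 1
    · simp [h]
    · rw [if_neg h, if_neg h]
      exact ih p.1 p.2 _ (by omega) (by omega)

lemma table_eq (kor eng : List String) :
    common_set_table kor eng
    = kor.map (fun w => (eng.map (fun w => PySem.Set.ofList w.toList)).map
        (fun es => PySem.Set.len (PySem.Set.inter (PySem.Set.ofList w.toList) es))) := by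
  unfold common_set_table
  rw [PySem.List.foldl_pyRange_zero_pyGetD kor ""
    (fun table w1 => table ++ [(PySem.List.pyRange 0 (PySem.List.len eng) 1).foldl (fun tmp element_2 =>
      tmp ++ [PySem.Set.len (PySem.Set.inter
        (PySem.Set.ofList w1.toList)
        (PySem.Set.ofList (PySem.List.pyGetD eng element_2 "").toList))]) []]) []]
  have hinner : ∀ w : String,
      (PySem.List.pyRange 0 (PySem.List.len eng) 1).foldl (fun tmp element_2 =>
        tmp ++ [PySem.Set.len (PySem.Set.inter
          (PySem.Set.ofList w.toList)
          (PySem.Set.ofList (PySem.List.pyGetD eng element_2 "").toList))]) []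
      = (eng.map (fun v => PySem.Set.ofList v.toList)).map
          (fun es => PySem.Set.len (PySem.Set.inter (PySem.Set.ofList w.toList) es)) := by
    intro w
    rw [PySem.List.foldl_pyRange_zero_pyGetD eng ""
      (fun tmp w2 => tmp ++ [PySem.Set.len (PySem.Set.inter
          (PySem.Set.ofList w.toList) (PySem.Set.ofList w2.toList))]) []]
    simp [← List.flatMap_def, ← List.map_eq_flatMap]
  simp only [hinner]
  simp [← List.flatMap_def, ← List.map_eq_flatMap]

-- reference DP: row n+1 is built from the prefix-maximum row of the first n rows
def pvDpN (T : List (List Int)) (En : Nat) : Nat → List (List Int) × List Int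
  | 0 => ([List.replicate (En+1) (0:Int)], List.replicate (En+1) (0:Int))
  | n+1 =>
    let st := pvDpN T En n
    let row := pvBuildRow (n : Int) (T.getD n []) st.2
    (st.1 ++ [row], pvUpdM st.2 row)

lemma bfold_eq (T : List (List Int)) (En : Nat) :
    ∀ n ≤ T.length,
    (PySem.List.enumerate (T.take n)).foldl
      (fun (st : List (List Int) × List Int) xt =>
        let row := pvBuildRow xt.1 xt.2 st.2
        (st.1 ++ [row], pvUpdM st.2 row))
      ([List.replicate (En+1) (0:Int)], List.replicate (En+1) (0:Int))
    = pvDpN T En n := by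
  intro n
  induction n with
  | zero => intro _; simp [pvDpN]
  | succ n ih =>
    intro hn
    have h : n < T.length := by omega
    have ht : T.take (n+1) = T.take n ++ [T[n]] := by
      rw [List.take_add_one]; simp [List.getElem?_eq_getElem h]
    rw [ht, PySem.List.enumerate_append, List.foldl_append]
    rw [ih (by omega)]
    have hlen : (T.take n).length = n := List.length_take_of_le (by omega)
    simp only [PySem.List.enumerate, hlen]
    show (fun (st : List (List Int) × List Int) xt =>
        let row := pvBuildRow xt.1 xt.2 st.2
        (st.1 ++ [row], pvUpdM st.2 row)) (pvDpN T En n) ((0 + (n:Int)), T[n]) = pvDpN T En (n+1)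
    simp only [pvDpN, zero_add]
    rw [List.getD_eq_getElem?_getD, List.getElem?_eq_getElem h]
    rfl

lemma buildRow_length (x : Int) (trow M : List Int) :
    (pvBuildRow x trow M).length = min trow.length M.length + 1 := by
  unfold pvBuildRow
  rw [PySem.List.foldl_append_singleton_eq_map]
  simp [PySem.List.length_enumerate]

lemma buildRow_head (x : Int) (trow M : List Int) :
    ∃ t, pvBuildRow x trow M = 0 :: t := by
  unfold pvBuildRow
  rw [PySem.List.foldl_append_singleton_eq_map]
  exact ⟨_, rfl⟩

lemma buildRow_getD (x : Int) (trow M : List Int) (k : Nat)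
    (hk : k < min trow.length M.length) :
    (pvBuildRow x trow M).getD (k+1) 0
    = if x = 0 ∨ (k:Int) = 0 then trow.getD k 0 else M.getD k 0 + trow.getD k 0 := by
  have hkt : k < trow.length := by omega
  have hkm : k < M.length := by omega
  unfold pvBuildRow
  rw [PySem.List.foldl_append_singleton_eq_map, List.singleton_append, List.getD_cons_succ]
  have hz : (trow.zip M)[k]? = some (trow[k], M[k]) := by
    rw [List.getElem?_eq_getElem (by simp [List.length_zip]; omega)]
    simp
  rw [List.getD_eq_getElem?_getD, List.getElem?_map, PySem.List.getElem?_enumerate, hz]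
  simp [List.getD_eq_getElem?_getD, hkt, hkm]

def pvUpdGo (r : Int) : List (Int × Int) → List Int
  | [] => []
  | (m, v) :: l => (max m (max r v)) :: pvUpdGo (max r v) l

lemma updM_go : ∀ (l : List (Int × Int)) (r : Int) (acc : List Int),
    (l.foldl (fun (p : Int × List Int) mv =>
      (max p.1 mv.2, p.2 ++ [max mv.1 (max p.1 mv.2)])) (r, acc)).2 = acc ++ pvUpdGo r l := by
  intro l
  induction l with
  | nil => intro r acc; simp [pvUpdGo]
  | cons mv l ih => intro r acc; simp [pvUpdGo, ih]

lemma updM_eq (M row : List Int) : pvUpdM M row = pvUpdGo 0 (M.zip row) := by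
  unfold pvUpdM; rw [updM_go]; simp

lemma updGo_length : ∀ (l : List (Int × Int)) (r : Int), (pvUpdGo r l).length = l.length := by
  intro l
  induction l with
  | nil => intro r; rfl
  | cons mv l ih => intro r; obtain ⟨m, v⟩ := mv; simp [pvUpdGo, ih]

lemma updGo_getD : ∀ (l : List (Int × Int)) (r : Int) (j : Nat), j < l.length →
    (pvUpdGo r l).getD j 0
    = max ((l.getD j (0,0)).1) (((l.map (·.2)).take (j+1)).foldl max r) := by
  intro l
  induction l with
  | nil => intro r j hj; simp at hj
  | cons mv l ih =>
    intro r j hj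
    obtain ⟨m, v⟩ := mv
    cases j with
    | zero => simp [pvUpdGo]
    | succ j =>
      simp only [pvUpdGo, List.getD_cons_succ, List.map_cons, List.take_succ_cons, List.foldl_cons]
      exact ih (max r v) j (by simpa using hj)

def pvRowMax (r : List Int) (m : Nat) : Int := (r.take (m+1)).foldl max 0
def pvRegMax (rows : List (List Int)) (m : Nat) : Int :=
  rows.foldl (fun a r => max a (pvRowMax r m)) 0

lemma foldl_max_max (l : List Int) : ∀ (a b : Int), l.foldl max (max a b) = max a (l.foldl max b) := by
  induction l with
  | nil => intro a b; rfl
  | cons x l ih =>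
    intro a b
    simp only [List.foldl_cons]
    rw [max_assoc, ih]

lemma flatfold (m : Nat) : ∀ (rows : List (List Int)) (a : Int),
    (∀ r ∈ rows, ∃ t, r = 0 :: t) →
    (rows.flatMap (fun r => r.take (m+1))).foldl max a
    = rows.foldl (fun a r => max a (pvRowMax r m)) a := by
  intro rows
  induction rows with
  | nil => intro a _; rfl
  | cons r rows ih =>
    intro a h0
    obtain ⟨t, rfl⟩ := h0 r (by simp)
    simp only [List.flatMap_cons, List.foldl_append, List.take_succ_cons, List.foldl_cons]
    rw [ih _ (fun r hr => h0 r (by simp [hr]))]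
    congr 1
    have h1 : max a (0:Int) = max a 0 := rfl
    calc List.foldl max (max a 0) (t.take m) = max a (List.foldl max 0 (t.take m)) := foldl_max_max _ a 0
      _ = max a (pvRowMax (0 :: t) m) := by
          unfold pvRowMax
          simp only [List.take_succ_cons, List.foldl_cons, max_self]

lemma flatmax (rows : List (List Int)) (m : Nat) (hne : rows ≠ [])
    (h0 : ∀ r ∈ rows, ∃ t, r = 0 :: t) :
    ((PySem.List.max? (rows.flatMap (fun r => r.take (m+1))) (fun v => v)).getD 0)
    = pvRegMax rows m := by
  obtain ⟨r0, rest, rfl⟩ : ∃ r0 rest, rows = r0 :: rest := by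
    cases rows with
    | nil => simp at hne
    | cons a b => exact ⟨a, b, rfl⟩
  obtain ⟨t0, rfl⟩ := h0 r0 (by simp)
  simp only [List.flatMap_cons, List.take_succ_cons, List.cons_append]
  rw [PySem.List.max?_id_cons, Option.getD_some, List.foldl_append]
  rw [flatfold m rest _ (fun r hr => h0 r (by simp [hr]))]
  unfold pvRegMax
  simp only [List.foldl_cons]
  congr 1
  unfold pvRowMax
  simp only [List.take_succ_cons, List.foldl_cons, max_self]
  exact (max_eq_right ((PySem.List.le_foldl_max (t0.take m) 0).1)).symm

lemma regMax_append (rs : List (List Int)) (r : List Int) (m : Nat) :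
    pvRegMax (rs ++ [r]) m = max (pvRegMax rs m) (pvRowMax r m) := by
  unfold pvRegMax
  rw [List.foldl_append]
  simp

-- bundled structural invariants of the reference DP
lemma dpN_inv (T : List (List Int)) (En : Nat) (hrow : ∀ r ∈ T, r.length = En) :
    ∀ n ≤ T.length,
    (pvDpN T En n).1.length = n + 1 ∧
    (pvDpN T En n).2.length = En + 1 ∧
    (∀ r ∈ (pvDpN T En n).1, (∃ t, r = 0 :: t) ∧ r.length = En + 1) ∧
    (∀ m ≤ En, (pvDpN T En n).2.getD m 0 = pvRegMax ((pvDpN T En n).1.drop 1) m) := by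
  intro n
  induction n with
  | zero =>
    intro _
    refine ⟨by simp [pvDpN], by simp [pvDpN], ?_, ?_⟩
    · intro r hr
      simp [pvDpN] at hr
      subst hr
      exact ⟨⟨List.replicate En 0, by simp [List.replicate_succ]⟩, by simp⟩
    · intro m hm
      simp [pvDpN, pvRegMax]
  | succ n ih =>
    intro hn
    obtain ⟨h1, h2, h3, h4⟩ := ih (by omega)
    have hTn : T.getD n [] = T[n]'(by omega) := by
      rw [List.getD_eq_getElem?_getD, List.getElem?_eq_getElem (by omega)]; rfl
    have hTlen : (T.getD n []).length = En := by rw [hTn]; exact hrow _ (by simp)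
    have hrowlen : (pvBuildRow (n:Int) (T.getD n []) (pvDpN T En n).2).length = En + 1 := by
      rw [buildRow_length, hTlen, h2]; omega
    set row := pvBuildRow (n:Int) (T.getD n []) (pvDpN T En n).2 with hrowdef
    have hstep : pvDpN T En (n+1) = ((pvDpN T En n).1 ++ [row], pvUpdM (pvDpN T En n).2 row) := rfl
    refine ⟨?_, ?_, ?_, ?_⟩
    · rw [hstep]; simp [h1]
    · rw [hstep]
      simp only [updM_eq]
      rw [updGo_length, List.length_zip, h2, hrowlen]
      omega
    · rw [hstep]
      intro r hr
      simp only [List.mem_append, List.mem_singleton] at hr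
      rcases hr with hr | hr
      · exact h3 r hr
      · subst hr
        exact ⟨buildRow_head _ _ _, hrowlen⟩
    · intro m hm
      rw [hstep]
      simp only
      rw [updM_eq, updGo_getD _ 0 m (by rw [List.length_zip, h2, hrowlen]; omega)]
      have hz : ((pvDpN T En n).2.zip row).getD m (0,0)
          = ((pvDpN T En n).2.getD m 0, row.getD m 0) := by
        rw [List.getD_eq_getElem?_getD, List.getElem?_eq_getElem (by rw [List.length_zip, h2, hrowlen]; omega)]
        simp [List.getD_eq_getElem?_getD, (by rw [h2]; omega : m < (pvDpN T En n).2.length), (by rw [hrowlen]; omega : m < row.length)]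
      rw [hz]
      have hmap : ((pvDpN T En n).2.zip row).map (·.2) = row := by
        have := List.map_snd_zip (l₁ := (pvDpN T En n).2) (l₂ := row) (by rw [h2, hrowlen])
        simpa using this
      rw [hmap]
      obtain ⟨hd, tl, hcons⟩ : ∃ hd tl, (pvDpN T En n).1 = hd :: tl := by
        cases hlist : (pvDpN T En n).1 with
        | nil => rw [hlist] at h1; simp at h1
        | cons a b => exact ⟨a, b, rfl⟩
      rw [hcons, List.cons_append, List.drop_one, List.tail_cons]
      have : (pvDpN T En n).1.drop 1 = tl := by rw [hcons]; rfl
      rw [regMax_append, ← this, ← h4 m hm]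
      rfl


lemma getD_append_len {α : Type} (l1 : List α) (a : α) (l2 : List α) (d : α) :
    (l1 ++ a :: l2).getD l1.length d = a := by
  rw [List.getD_eq_getElem?_getD, List.getElem?_append_right (le_refl _)]
  simp

lemma set_append_len {α : Type} (l1 : List α) (a : α) (l2 : List α) (v : α) :
    (l1 ++ a :: l2).set l1.length v = l1 ++ v :: l2 := by
  induction l1 with
  | nil => rfl
  | cons x l ih => simp [ih]

lemma candFlatShift (L : List (List Int)) (y : Int) (n : Nat) (acc : List Int) :
    (PySem.List.pyRange 0 (n:Int) 1).foldl
      (fun c i => c ++ PySem.List.slice (PySem.List.pyGetD L (i+1) []) none (some y)) acc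
    = acc ++ ((L.drop 1).take n).flatMap (fun r => PySem.List.slice r none (some y)) := by
  refine Eq.trans (PySem.List.foldl_congr_mem _ _
    (fun c i => c ++ PySem.List.slice (PySem.List.pyGetD (L.drop 1) i []) none (some y)) _ ?_)
    (candFlat (L.drop 1) y n acc)
  intro acc2 i hi
  have h0 : 0 ≤ i := (PySem.List.mem_pyRange_one.mp hi).1
  obtain ⟨k, rfl⟩ : ∃ k : Nat, i = (k : Int) := ⟨i.toNat, (Int.toNat_of_nonneg h0).symm⟩
  have hc : ((k:Int) + 1) = ((k+1 : Nat) : Int) := by push_cast; ring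
  show acc2 ++ _ = acc2 ++ _
  rw [hc, PySem.List.pyGetD_natCast, PySem.List.pyGetD_natCast]
  congr 2
  rw [List.getD_eq_getElem?_getD, List.getD_eq_getElem?_getD, List.getElem?_drop]
  rw [Nat.add_comm]

lemma A_inner (T : List (List Int)) (En : Nat) (hrow : ∀ r ∈ T, r.length = En)
    (n : Nat) (hn : n < T.length) :
    ∀ (m : Nat), m ≤ En → ∀ (rest : List (List Int)),
    (PySem.List.pyRange 0 (m:Int) 1).foldl
      (fun L y =>
        let v : Int :=
          if (n:Int) = 0 ∨ y = 0 then
            PySem.List.pyGetD (PySem.List.pyGetD T (n:Int) []) y 0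
          else
            let candidate := (PySem.List.pyRange 0 (n:Int) 1).foldl (fun candidate tmp_x =>
              candidate ++ PySem.List.slice (PySem.List.pyGetD L (tmp_x + 1) []) none (some (y + 1))) []
            ((PySem.List.max? candidate (fun v => v)).getD 0) +
              PySem.List.pyGetD (PySem.List.pyGetD T (n:Int) []) y 0
        PySem.List.pySetD L ((n:Int) + 1)
          (PySem.List.pySetD (PySem.List.pyGetD L ((n:Int) + 1) []) (y + 1)
            (PySem.List.pyGetD (PySem.List.pyGetD L ((n:Int) + 1) []) (y + 1) 0 + v)))
      ((pvDpN T En n).1 ++ (List.replicate (En+1) (0:Int)) :: rest)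
    = (pvDpN T En n).1 ++ ((pvBuildRow (n:Int) (T.getD n []) (pvDpN T En n).2).take (m+1)
        ++ List.replicate (En - m) 0) :: rest := by
  intro m
  induction m with
  | zero =>
    intro _ rest
    rw [show ((0:Nat):Int) = 0 from rfl, PySem.List.pyRange_one_eq_nil (le_refl 0), List.foldl_nil]
    obtain ⟨t, ht⟩ := buildRow_head (n:Int) (T.getD n []) (pvDpN T En n).2
    rw [ht]
    simp [List.replicate_succ]
  | succ m ih =>
    intro hm rest
    have hm' : m < En := by omega
    obtain ⟨h1, h2, h3, h4⟩ := dpN_inv T En hrow n (by omega)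
    have hTn : (T.getD n []).length = En := by
      rw [List.getD_eq_getElem?_getD, List.getElem?_eq_getElem hn]
      exact hrow _ (by simp)
    have hsplit : ((m+1:Nat):Int) = (m:Int)+1 := by push_cast; ring
    rw [hsplit, PySem.List.pyRange_one_succ_right (by positivity), List.foldl_append,
        ih (by omega) rest, List.foldl_cons, List.foldl_nil]
    set B := pvBuildRow (n:Int) (T.getD n []) (pvDpN T En n).2 with hBdef
    set R := (pvDpN T En n).1 with hRdef
    set P := B.take (m+1) ++ List.replicate (En - m) (0:Int) with hPdef
    have hBlen : B.length = En + 1 := by rw [hBdef, buildRow_length, hTn, h2]; omega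
    have htake : (B.take (m+1)).length = m+1 := by rw [List.length_take]; omega
    have hP2 : P = B.take (m+1) ++ (0:Int) :: List.replicate (En - m - 1) 0 := by
      rw [hPdef]
      congr 1
      rw [show En - m = (En - m - 1) + 1 from by omega, List.replicate_succ]
      have he : En - m - 1 + 1 - 1 = En - m - 1 := by omega
      rw [he]
    have hcast : ((m:Int) + 1) = ((m+1 : Nat) : Int) := by push_cast; ring
    have hncast : ((n:Int) + 1) = ((n+1 : Nat) : Int) := by push_cast; ring
    have hget1 : PySem.List.pyGetD (R ++ P :: rest) ((n:Int)+1) [] = P := by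
      rw [hncast, PySem.List.pyGetD_natCast, show n+1 = R.length from h1.symm]
      exact getD_append_len R P rest []
    have hold : PySem.List.pyGetD P ((m:Int)+1) 0 = 0 := by
      rw [hcast, PySem.List.pyGetD_natCast, hP2]
      have hg := getD_append_len (B.take (m+1)) (0:Int) (List.replicate (En-m-1) 0) 0
      rw [htake] at hg
      exact hg
    have hBv : B.getD (m+1) 0
        = if (n:Int) = 0 ∨ ((m:Nat):Int) = 0 then (T.getD n []).getD m 0
          else (pvDpN T En n).2.getD m 0 + (T.getD n []).getD m 0 :=
      buildRow_getD _ _ _ m (by rw [hTn, h2]; omega)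
    have hsl : ∀ r : List Int, PySem.List.slice r none (some ((m:Int)+1)) = r.take (m+1) := by
      intro r
      rw [hcast, PySem.List.slice_to _ (by positivity)]
      simp
    have hcand : ¬ ((n:Int) = 0 ∨ ((m:Nat):Int) = 0) →
        ((PySem.List.max? ((PySem.List.pyRange 0 (n:Int) 1).foldl (fun c i =>
            c ++ PySem.List.slice (PySem.List.pyGetD (R ++ P :: rest) (i+1) []) none (some ((m:Int)+1))) [])
          (fun v => v)).getD 0)
        = (pvDpN T En n).2.getD m 0 := by
      intro hne
      have hn1 : 1 ≤ n := by
        by_contra h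
        exact hne (Or.inl (by simp [show n = 0 from by omega]))
      rw [candFlatShift]
      have hdrop : ((R ++ P :: rest).drop 1).take n = R.drop 1 := by
        obtain ⟨hd, tl, hR⟩ : ∃ hd tl, R = hd :: tl := by
          cases hRc : R with
          | nil => rw [hRc] at h1; simp at h1
          | cons a b => exact ⟨a, b, rfl⟩
        have htl : tl.length = n := by
          have := h1; rw [hR] at this; simp at this; omega
        rw [hR, List.cons_append, List.drop_one, List.tail_cons,
            List.take_append_of_le_length (by omega), List.take_of_length_le (by omega)]
        simp
      rw [hdrop]
      simp only [hsl, List.nil_append]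
      rw [flatmax (R.drop 1) m (by
            intro hnil
            have := congrArg List.length hnil
            simp [h1] at this
            omega)
          (fun r hr => ((h3 r (List.mem_of_mem_drop hr)).1))]
      exact (h4 m (by omega)).symm
    have hsetP : PySem.List.pySetD P ((m:Int)+1) (0 + B.getD (m+1) 0)
        = B.take (m+1+1) ++ List.replicate (En-m-1) 0 := by
      rw [zero_add, hcast, PySem.List.pySetD_natCast, hP2]
      have hs := set_append_len (B.take (m+1)) (0:Int) (List.replicate (En-m-1) 0) (B.getD (m+1) 0)
      rw [htake] at hs
      rw [hs]
      rw [List.getD_eq_getElem?_getD, List.getElem?_eq_getElem (by omega), Option.getD_some]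
      have htk : B.take (m+1+1) = B.take (m+1) ++ [B[m+1]'(by omega)] := by
        rw [List.take_add_one, List.getElem?_eq_getElem (by omega), Option.toList_some]
      rw [htk, List.append_assoc, List.singleton_append]
    have hsetL : ∀ Q, PySem.List.pySetD (R ++ P :: rest) ((n:Int)+1) Q = R ++ Q :: rest := by
      intro Q
      rw [hncast, PySem.List.pySetD_natCast, show n+1 = R.length from h1.symm]
      exact set_append_len R P rest Q
    show (let v : Int :=
          if (n:Int) = 0 ∨ ((m:Nat):Int) = 0 then
            PySem.List.pyGetD (PySem.List.pyGetD T (n:Int) []) (m:Int) 0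
          else
            ((PySem.List.max? ((PySem.List.pyRange 0 (n:Int) 1).foldl (fun c i =>
              c ++ PySem.List.slice (PySem.List.pyGetD (R ++ P :: rest) (i+1) []) none (some ((m:Int)+1))) [])
              (fun v => v)).getD 0) +
              PySem.List.pyGetD (PySem.List.pyGetD T (n:Int) []) (m:Int) 0
        PySem.List.pySetD (R ++ P :: rest) ((n:Int) + 1)
          (PySem.List.pySetD (PySem.List.pyGetD (R ++ P :: rest) ((n:Int) + 1) []) ((m:Int) + 1)
            (PySem.List.pyGetD (PySem.List.pyGetD (R ++ P :: rest) ((n:Int) + 1) []) ((m:Int) + 1) 0 + v)))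
      = R ++ (B.take (m+1+1) ++ List.replicate (En - (m+1)) 0) :: rest
    simp only [hget1, hold]
    have hTg : PySem.List.pyGetD (PySem.List.pyGetD T (n:Int) []) (m:Int) 0
        = (T.getD n []).getD m 0 := by
      rw [PySem.List.pyGetD_natCast, PySem.List.pyGetD_natCast]
    by_cases hc0 : (n:Int) = 0 ∨ ((m:Nat):Int) = 0
    · rw [if_pos hc0] at hBv ⊢
      rw [hTg, ← hBv, hsetP, hsetL, show En - (m+1) = En - m - 1 from by omega]
    · rw [if_neg hc0] at hBv ⊢
      rw [hTg, hcand hc0, ← hBv, hsetP, hsetL, show En - (m+1) = En - m - 1 from by omega]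

lemma A_dp (T : List (List Int)) (En : Nat) (hrow : ∀ r ∈ T, r.length = En) :
    ∀ n, n ≤ T.length →
    (PySem.List.pyRange 0 (n:Int) 1).foldl
      (fun L x =>
        (PySem.List.pyRange 0 (En:Int) 1).foldl (fun L y =>
          let v : Int :=
            if x = 0 ∨ y = 0 then
              PySem.List.pyGetD (PySem.List.pyGetD T x []) y 0
            else
              let candidate := (PySem.List.pyRange 0 x 1).foldl (fun candidate tmp_x =>
                candidate ++ PySem.List.slice (PySem.List.pyGetD L (tmp_x + 1) []) none (some (y + 1))) []
              ((PySem.List.max? candidate (fun v => v)).getD 0) +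
                PySem.List.pyGetD (PySem.List.pyGetD T x []) y 0
          PySem.List.pySetD L (x + 1)
            (PySem.List.pySetD (PySem.List.pyGetD L (x + 1) []) (y + 1)
              (PySem.List.pyGetD (PySem.List.pyGetD L (x + 1) []) (y + 1) 0 + v))) L)
      (List.replicate (T.length + 1) (List.replicate (En+1) (0:Int)))
    = (pvDpN T En n).1 ++ List.replicate (T.length - n) (List.replicate (En+1) (0:Int)) := by
  intro n
  induction n with
  | zero =>
    intro _
    rw [show ((0:Nat):Int) = 0 from rfl, PySem.List.pyRange_one_eq_nil (le_refl 0), List.foldl_nil]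
    simp [pvDpN, List.replicate_succ]
  | succ n ih =>
    intro hn
    rw [show ((n+1:Nat):Int) = (n:Int)+1 from by push_cast; ring,
        PySem.List.pyRange_one_succ_right (by positivity), List.foldl_append, ih (by omega),
        List.foldl_cons, List.foldl_nil,
        show T.length - n = (T.length - n - 1) + 1 from by omega, List.replicate_succ]
    have hIn := A_inner T En hrow n (by omega) En (le_refl En)
      (List.replicate (T.length - n - 1) (List.replicate (En+1) (0:Int)))
    simp only []
    rw [hIn]
    obtain ⟨h1, h2, h3, h4⟩ := dpN_inv T En hrow n (by omega)
    have hTn : (T.getD n []).length = En := by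
      rw [List.getD_eq_getElem?_getD, List.getElem?_eq_getElem (by omega)]
      exact hrow _ (by simp)
    have hBlen : (pvBuildRow (n:Int) (T.getD n []) (pvDpN T En n).2).length = En + 1 := by
      rw [buildRow_length, hTn, h2]; omega
    rw [List.take_of_length_le (by omega)]
    simp only [Nat.sub_self, List.replicate_zero, List.append_nil]
    show _ = ((pvDpN T En n).1 ++ [pvBuildRow (n:Int) (T.getD n []) (pvDpN T En n).2])
        ++ List.replicate (T.length - (n+1)) (List.replicate (En+1) (0:Int))
    rw [List.append_assoc, List.singleton_append,
        show T.length - (n+1) = T.length - n - 1 from by omega]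

lemma map_const_len {α β : Type} (l : List α) (c : β) :
    l.map (fun _ => c) = List.replicate l.length c := by
  induction l with
  | nil => rfl
  | cons x t ih => simp [ih, List.replicate_succ]

-- ===== VERDICT =====
theorem word_lcs_spec : Claim_equal_word_lcs := by
  unfold Claim_equal_word_lcs Spec_word_lcs
  intro kor eng _
  unfold word_lcs word_lcs_alt
  by_cases h : PySem.List.len kor = 0 ∨ PySem.List.len eng = 0
  · rw [if_pos h, if_pos h]
  · rw [if_neg h, if_neg h]
    have hK : 1 ≤ kor.length := by
      cases kor with
      | nil => exact absurd (Or.inl (by simp [PySem.List.len])) h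
      | cons a t => simp
    have hE : 1 ≤ eng.length := by
      cases eng with
      | nil => exact absurd (Or.inr (by simp [PySem.List.len])) h
      | cons a t => simp
    simp only []
    rw [table_eq kor eng]
    set T := kor.map (fun w => (eng.map (fun w => PySem.Set.ofList w.toList)).map
        (fun es => PySem.Set.len (PySem.Set.inter (PySem.Set.ofList w.toList) es))) with hTdef
    have hTlen : T.length = kor.length := by rw [hTdef]; simp
    have hrowT : ∀ r ∈ T, r.length = eng.length := by
      intro r hr
      rw [hTdef] at hr
      obtain ⟨w, _, rfl⟩ := List.mem_map.mp hr
      simp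
    have hlenT : PySem.List.len T = (kor.length : Int) := by
      simp [PySem.List.len, hTlen]
    have hlenT0 : PySem.List.len (PySem.List.pyGetD T 0 []) = (eng.length : Int) := by
      have h0 : (0:Int) = ((0:Nat):Int) := rfl
      rw [h0, PySem.List.pyGetD_natCast]
      have : T.getD 0 [] = T[0]'(by omega) := by
        rw [List.getD_eq_getElem?_getD, List.getElem?_eq_getElem (by omega)]; rfl
      rw [this]
      have hmem : T[0]'(by omega) ∈ T := List.getElem_mem (by omega)
      simp [PySem.List.len, hrowT _ hmem]
    have hlenk : PySem.List.len kor = (kor.length : Int) := by simp [PySem.List.len]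
    have hlene : PySem.List.len eng = (eng.length : Int) := by simp [PySem.List.len]
    have hinit : (PySem.List.pyRange 0 (PySem.List.len kor + 1) 1).map (fun _ =>
        (PySem.List.pyRange 0 (PySem.List.len eng + 1) 1).map (fun _ => (0 : Int)))
        = List.replicate (kor.length + 1) (List.replicate (eng.length + 1) (0:Int)) := by
      rw [map_const_len, map_const_len, PySem.List.length_pyRange_one, PySem.List.length_pyRange_one,
          hlenk, hlene]
      congr 2
    rw [hinit]
    simp only [hlenT, hlenT0, hlenk, hlene]
    have hAdp := A_dp T eng.length hrowT kor.length (by omega)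
    simp only [] at hAdp
    rw [hTlen] at hAdp
    rw [hAdp, Nat.sub_self, List.replicate_zero, List.append_nil]
    have hinitB : PySem.List.pyRepeat [(0:Int)] ((eng.length : Int) + 1)
        = List.replicate (eng.length + 1) (0:Int) := by
      rw [PySem.List.pyRepeat_singleton]
      congr 1
    rw [hinitB]
    have hb := bfold_eq T eng.length T.length (le_refl _)
    rw [List.take_length] at hb
    simp only [] at hb
    rw [hb, hTlen]
    rw [trace_eq ((pvDpN T eng.length kor.length).1) (kor.length + 2)
        (kor.length : Int) (eng.length : Int) _ (by omega) (by omega)]
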